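-- pv_equiv track=rewrite | github.com/quijot/ppp-service-ggsr | ppp/transform.py | _find_best_week
-- ===== SOURCE A (Python) =====
-- def _find_best_week(target_wk: int, iws: dict) -> int:
--     """
--     Encuentra la semana GPS disponible en iws más cercana a target_wk.
--
--     El servicio de NRCan devuelve coordenadas referidas a la época de
--     las observaciones. Queremos usar la semana más cercana a esa época
--     para minimizar la extrapolación temporal del campo de deltas.
--
--     Busca primero hacia atrás (semanas pasadas con datos consolidados)
--     y luego hacia adelante, prefiriendo semanas pasadas en caso de empate.
--     """
--     if target_wk in iws:
--         return target_wk
--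
--     for offset in range(1, 200):
--         if target_wk - offset in iws:
--             return target_wk - offset
--         if target_wk + offset in iws:
--             return target_wk + offset
--
--     raise ValueError(f"No se encontró ninguna semana disponible cerca de {target_wk}")
-- ===== SOURCE B (Python) =====
-- def _find_best_week(target_wk: int, iws: dict) -> int:
--     cands = [wk for wk in iws if abs(wk - target_wk) <= 199]
--     if not cands:
--         raise ValueError(f"No se encontró ninguna semana disponible cerca de {target_wk}")
--     return min(cands, key=lambda wk: 2 * abs(wk - target_wk) + (wk > target_wk))
-- ===== Notes on version B (the rewrite author's own statement) =====
-- stated objective: idiomatic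
-- what changed: Replaced the outward probing loop (offset 1..199, membership test per offset) by a single scan: filter keys within distance 199 and take min with the composite key 2*abs(wk-target_wk)+(wk>target_wk), which encodes nearest-first with past-preferred tie-break.
import Mathlib
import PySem

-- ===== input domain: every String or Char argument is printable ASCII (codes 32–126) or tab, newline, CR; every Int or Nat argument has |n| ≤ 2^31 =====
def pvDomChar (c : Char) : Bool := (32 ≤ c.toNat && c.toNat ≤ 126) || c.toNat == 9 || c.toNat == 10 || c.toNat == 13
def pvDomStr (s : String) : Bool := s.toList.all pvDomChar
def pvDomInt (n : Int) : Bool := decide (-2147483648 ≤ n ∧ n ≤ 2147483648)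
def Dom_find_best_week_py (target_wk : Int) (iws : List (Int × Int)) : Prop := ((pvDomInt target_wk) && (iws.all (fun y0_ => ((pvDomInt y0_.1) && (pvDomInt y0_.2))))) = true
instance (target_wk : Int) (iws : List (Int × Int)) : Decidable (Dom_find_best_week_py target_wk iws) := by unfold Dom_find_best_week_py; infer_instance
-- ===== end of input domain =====

-- B replaces A's outward probing loop by a filter-then-min scan over the keys (idiomatic; same results).
-- A raises ValueError when no key is within distance 199 of target_wk; Pre_ excludes exactly those inputs (B raises the same error there).


-- ===== PORT A =====
-- literal port of A: membership test on the keys, then the offset loop 1..199 probing past then future;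
-- where the Python raises ValueError the fold yields none and we return 0 (excluded by Pre_).
def find_best_week_py (target_wk : Int) (iws : List (Int × Int)) : Int :=
  if target_wk ∈ iws.map Prod.fst then target_wk
  else
    ((PySem.List.pyRange 1 200 1).foldl
      (fun acc offset =>
        match acc with
        | some r => some r
        | none =>
          if target_wk - offset ∈ iws.map Prod.fst then some (target_wk - offset)
          else if target_wk + offset ∈ iws.map Prod.fst then some (target_wk + offset)
          else none) none).getD 0

-- ===== PORT B =====
-- literal port of B: filter keys within 199, then min by key 2*|wk-t| + (wk > t);
-- on the empty candidate list the Python raises ValueError (excluded by Pre_), here getD 0.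
def find_best_week_py_alt (target_wk : Int) (iws : List (Int × Int)) : Int :=
  (PySem.List.min?
      ((iws.map Prod.fst).filter (fun wk => decide (|wk - target_wk| ≤ 199)))
      (fun wk => 2 * |wk - target_wk| + (if target_wk < wk then 1 else 0))).getD 0

-- ===== PRECONDITION & SPEC =====
-- Pre_ excludes exactly the inputs on which A raises ValueError (no key within distance 199 of target_wk); B raises the same error there.
def Pre_find_best_week_py (target_wk : Int) (iws : List (Int × Int)) : Prop :=
  ∃ wk ∈ iws.map Prod.fst, |wk - target_wk| ≤ 199
instance (target_wk : Int) (iws : List (Int × Int)) : Decidable (Pre_find_best_week_py target_wk iws) := by unfold Pre_find_best_week_py; infer_instance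

def pvWitness_find_best_week_py : Int × (List (Int × Int)) := (2000, [(1998, 7), (2003, 4)])

def Spec_find_best_week_py (target_wk : Int) (iws : List (Int × Int)) (out : Int) : Prop := out = find_best_week_py_alt target_wk iws
instance (target_wk : Int) (iws : List (Int × Int)) (out : Int) : Decidable (Spec_find_best_week_py target_wk iws out) := by unfold Spec_find_best_week_py; infer_instance

-- ===== CLAIM (what is proved, stated in full; the proofs are below) =====
def Claim_equal_find_best_week_py : Prop := ∀ (target_wk : Int) (iws : List (Int × Int)), Dom_find_best_week_py target_wk iws → Pre_find_best_week_py target_wk iws → Spec_find_best_week_py target_wk iws (find_best_week_py target_wk iws)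

-- ===== LEMMAS AND PROOFS =====

-- the per-offset probe of A, as a function
def pvHit (t : Int) (ks : List Int) (d : Int) : Option Int :=
  if t - d ∈ ks then some (t - d)
  else if t + d ∈ ks then some (t + d)
  else none

theorem pvFoldl_some (f : Int → Option Int) (l : List Int) (r : Int) :
    l.foldl (fun a o => match a with | some x => some x | none => f o) (some r) = some r := by
  induction l with
  | nil => rfl
  | cons a l ih => simpa using ih

-- A's fold over the offsets is first-hit search
theorem pvFoldl_hit (t : Int) (ks : List Int) (l : List Int) :
    l.foldl
      (fun acc offset =>
        match acc with
        | some r => some r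
        | none =>
          if t - offset ∈ ks then some (t - offset)
          else if t + offset ∈ ks then some (t + offset)
          else none) none
    = l.findSome? (pvHit t ks) := by
  induction l with
  | nil => rfl
  | cons a l ih =>
    simp only [List.foldl_cons, List.findSome?]
    have hstep : (if t - a ∈ ks then some (t - a)
        else if t + a ∈ ks then some (t + a) else none) = pvHit t ks a := rfl
    rw [hstep]
    cases h : pvHit t ks a with
    | none => simpa using ih
    | some r =>
      simpa using pvFoldl_some
        (fun o => if t - o ∈ ks then some (t - o)
          else if t + o ∈ ks then some (t + o) else none) l r

-- findSome? over a range finds the first hit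
theorem pvFindSome_range (f : Int → Option Int) (a b m : Int) (v : Int)
    (ha : a ≤ m) (hb : m < b) (hv : f m = some v)
    (hn : ∀ x, a ≤ x → x < m → f x = none) :
    (PySem.List.pyRange a b 1).findSome? f = some v := by
  rw [PySem.List.pyRange_one_append a m b ha (le_of_lt hb), List.findSome?_append]
  have h1 : (PySem.List.pyRange a m 1).findSome? f = none := by
    rw [List.findSome?_eq_none_iff]
    intro x hx
    rw [PySem.List.mem_pyRange_one] at hx
    exact hn x hx.1 hx.2
  rw [h1, PySem.List.pyRange_one_cons hb]
  simp [List.findSome?, hv]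

-- min? returns the strictly-unique key-minimal element
theorem pvMin_unique (xs : List Int) (key : Int → Int) (x : Int) (hx : x ∈ xs)
    (h : ∀ y ∈ xs, y ≠ x → key x < key y) :
    PySem.List.min? xs key = some x := by
  cases hm : PySem.List.min? xs key with
  | none =>
    rw [PySem.List.min?_eq_none_iff] at hm
    simp [hm] at hx
  | some m =>
    have hmem : m ∈ xs := PySem.List.min?_mem hm
    have hle : key m ≤ key x := PySem.List.min?_isMin hm x hx
    by_cases hxm : m = x
    · rw [hxm]
    · exact absurd hle (not_le.mpr (h m hmem hxm))

-- ===== VERDICT (by name: the statement is the Claim_ definition above) =====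
theorem find_best_week_py_spec : Claim_equal_find_best_week_py := by
  intro t iws _ hpre
  unfold Spec_find_best_week_py find_best_week_py find_best_week_py_alt
  set ks := iws.map Prod.fst with hks
  obtain ⟨w, hw, hwd⟩ := hpre
  -- any key y ∈ ks is reached at offset |y - t|
  have hPk : ∀ y, y ∈ ks → (t - (((y - t).natAbs : Nat) : Int) ∈ ks ∨ t + (((y - t).natAbs : Nat) : Int) ∈ ks) := by
    intro y hy
    by_cases h : y ≤ t
    · left
      have he : t - (((y - t).natAbs : Nat) : Int) = y := by
        rw [Int.ofNat_natAbs_of_nonpos (by omega)]; omega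
      rwa [he]
    · right
      have he : t + (((y - t).natAbs : Nat) : Int) = y := by
        rw [Int.natAbs_of_nonneg (by omega)]; omega
      rwa [he]
  by_cases h0 : t ∈ ks
  · -- A returns t; B's min over the candidates is t (key 0, strictly minimal)
    have ht : t ∈ ks.filter (fun wk => decide (|wk - t| ≤ 199)) := by
      rw [List.mem_filter]; exact ⟨h0, by simp⟩
    have hBmin : PySem.List.min? (ks.filter (fun wk => decide (|wk - t| ≤ 199)))
        (fun wk => 2 * |wk - t| + (if t < wk then 1 else 0)) = some t := by
      apply pvMin_unique _ _ t ht
      intro y hy hne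
      have h1 : |t - t| = (0 : Int) := by simp
      rw [h1, if_neg (lt_irrefl t)]
      have h2 : (1 : Int) ≤ |y - t| := by
        by_cases h : y ≤ t
        · rw [abs_of_nonpos (by omega)]; omega
        · rw [abs_of_pos (by omega)]; omega
      split <;> omega
    rw [if_pos h0, hBmin]
    rfl
  · rw [if_neg h0]
    -- the least hitting offset d0
    have hP : ∃ d : ℕ, (t - (d : Int) ∈ ks ∨ t + (d : Int) ∈ ks) := ⟨(w - t).natAbs, hPk w hw⟩
    set d0 : ℕ := Nat.find hP with hd0def
    have hd0 : t - (d0 : Int) ∈ ks ∨ t + (d0 : Int) ∈ ks := Nat.find_spec hP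
    have hmin : ∀ d : ℕ, d < d0 → ¬(t - (d : Int) ∈ ks ∨ t + (d : Int) ∈ ks) :=
      fun d hd => Nat.find_min hP hd
    have habsw : (((w - t).natAbs : Nat) : Int) = |w - t| := (Int.abs_eq_natAbs (w - t)).symm
    have hd0pos : 1 ≤ (d0 : Int) := by
      rcases Nat.eq_zero_or_pos d0 with h | h
      · exfalso
        rw [h] at hd0
        simp only [Nat.cast_zero, sub_zero, add_zero, or_self] at hd0
        exact h0 hd0
      · exact_mod_cast h
    have hd0w : d0 ≤ (w - t).natAbs := Nat.find_min' hP (hPk w hw)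
    have hd0le : (d0 : Int) ≤ 199 := by
      have : ((d0 : Nat) : Int) ≤ (((w - t).natAbs : Nat) : Int) := by exact_mod_cast hd0w
      omega
    -- the value A returns
    set v : Int := if t - (d0 : Int) ∈ ks then t - (d0 : Int) else t + (d0 : Int) with hvdef
    have hvin : v ∈ ks := by
      rw [hvdef]
      split
      · assumption
      · rcases hd0 with h | h
        · exact absurd h (by assumption)
        · exact h
    have hvabs : |v - t| = (d0 : Int) := by
      rw [hvdef]; split
      · rw [abs_of_nonpos (by omega)]; omega
      · rw [abs_of_nonneg (by omega)]; omega
    -- A's side: the fold returns some v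
    have hhit : pvHit t ks (d0 : Int) = some v := by
      rw [pvHit, hvdef]
      split
      · rfl
      · rcases hd0 with h | h
        · exact absurd h (by assumption)
        · rw [if_pos h]
    have hnone : ∀ x : Int, 1 ≤ x → x < (d0 : Int) → pvHit t ks x = none := by
      intro x h1 h2
      have hx : x = (x.toNat : Int) := by omega
      have hlt : x.toNat < d0 := by omega
      have := hmin x.toNat hlt
      rw [not_or] at this
      rw [pvHit, hx, if_neg this.1, if_neg this.2]
    rw [pvFoldl_hit t ks,
        pvFindSome_range (pvHit t ks) 1 200 (d0 : Int) v hd0pos (by omega) hhit hnone]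
    -- B's side: min? of the candidates is v
    have hvc : v ∈ ks.filter (fun wk => decide (|wk - t| ≤ 199)) := by
      rw [List.mem_filter]
      refine ⟨hvin, by simp [hvabs]; omega⟩
    have hBmin : PySem.List.min? (ks.filter (fun wk => decide (|wk - t| ≤ 199)))
        (fun wk => 2 * |wk - t| + (if t < wk then 1 else 0)) = some v := by
      apply pvMin_unique _ _ v hvc
      intro y hy hne
      rw [List.mem_filter] at hy
      obtain ⟨hyks, _⟩ := hy
      have hyt : y ≠ t := fun h => h0 (h ▸ hyks)
      have habsy : (((y - t).natAbs : Nat) : Int) = |y - t| := (Int.abs_eq_natAbs (y - t)).symm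
      -- by minimality of d0, |y - t| ≥ d0
      have hdy : (d0 : Int) ≤ |y - t| := by
        by_contra hc
        rw [not_le] at hc
        have hlt : (y - t).natAbs < d0 := by omega
        exact hmin _ hlt (hPk y hyks)
      rcases eq_or_lt_of_le hdy with hdy0 | hdy0
      · -- same distance: y ∈ {t - d0, t + d0}
        have hy2 : y = t - (d0 : Int) ∨ y = t + (d0 : Int) := by
          by_cases h : y ≤ t
          · left; rw [abs_of_nonpos (by omega)] at hdy0; omega
          · right; rw [abs_of_pos (by omega)] at hdy0; omega
        rcases hy2 with hy2 | hy2
        · -- y = t - d0 ∈ ks forces v = t - d0 = y, contradicting y ≠ v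
          have hveq : v = t - (d0 : Int) := by
            rw [hvdef, if_pos (hy2 ▸ hyks)]
          exact absurd (hy2.trans hveq.symm) hne
        · -- y = t + d0: then t - d0 ∈ ks (else v = y), and the tie-break prefers v = t - d0
          by_cases hpast : t - (d0 : Int) ∈ ks
          · have hveq : v = t - (d0 : Int) := by rw [hvdef, if_pos hpast]
            rw [hveq, hy2]
            have h1 : |t - (d0 : Int) - t| = (d0 : Int) := by
              rw [abs_of_nonpos (by omega)]; omega
            have h2 : |t + (d0 : Int) - t| = (d0 : Int) := by
              rw [abs_of_nonneg (by omega)]; omega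
            rw [h1, h2, if_neg (by omega), if_pos (by omega)]
            omega
          · have hveq : v = t + (d0 : Int) := by rw [hvdef, if_neg hpast]
            exact absurd (hy2.trans hveq.symm) hne
      · -- strictly farther: key strictly larger
        rw [hvabs]
        split <;> split <;> omega
    rw [hBmin]

theorem pvWitness_valid :
    Dom_find_best_week_py pvWitness_find_best_week_py.1 pvWitness_find_best_week_py.2 ∧
    Pre_find_best_week_py pvWitness_find_best_week_py.1 pvWitness_find_best_week_py.2 := by
  constructor
  · decide
  · decide
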